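-- pv_equiv track=rewrite | github.com/NyAinaRatolojanahary/ML-Codage-Sardinas-Patterson | DataCreation.py | isLongueurFixe
-- ===== SOURCE A (Python) =====
-- def isLongueurFixe(language):
--     if not isinstance(language, list) or not language or not language[0]:  # Vérifie si c'est une liste valide et non vide
--         return False
--     longueur = len(language[0])
--     for mot in language:
--         if len(mot) != longueur:
--             return False
--     return True
-- ===== SOURCE B (Python) =====
-- def isLongueurFixe(language):
--     if not isinstance(language, list) or not language or not language[0]:
--         return False
--     lengths = list(map(len, language))
--     return min(lengths) == max(lengths)
-- ===== Notes on version B (the rewrite author's own statement) =====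
-- stated objective: alternative
-- what changed: Instead of comparing every word's length to the first word's length with an early exit, B maps the list to its lengths and checks that the minimum length equals the maximum length (extremal-value characterisation of 'all equal').
import Mathlib
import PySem

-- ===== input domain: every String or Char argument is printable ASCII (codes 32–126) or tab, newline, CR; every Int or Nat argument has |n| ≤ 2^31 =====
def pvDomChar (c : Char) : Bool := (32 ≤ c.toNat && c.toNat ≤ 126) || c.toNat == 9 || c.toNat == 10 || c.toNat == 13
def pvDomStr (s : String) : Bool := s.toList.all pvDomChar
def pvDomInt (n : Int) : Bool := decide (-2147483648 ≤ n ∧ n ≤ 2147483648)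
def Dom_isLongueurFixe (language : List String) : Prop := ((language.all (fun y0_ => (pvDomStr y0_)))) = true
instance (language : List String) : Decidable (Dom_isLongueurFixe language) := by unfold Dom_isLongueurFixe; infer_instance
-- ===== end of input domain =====

-- B replaces A's compare-each-length-to-the-first loop by an extremal characterisation: min of the lengths equals max (alternative decomposition, same cost).


-- ===== PORT A =====
-- the for-loop with early return: compare each word's length to the reference
def isLongueurFixeLoop (longueur : Int) : List String → Bool
  | [] => true
  | mot :: rest => if PySem.Str.len mot ≠ longueur then false else isLongueurFixeLoop longueur rest

def isLongueurFixe (language : List String) : Bool :=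
  match language with
  | [] => false                                 -- 'not language' (isinstance is always a list here)
  | w :: _ =>
    if PySem.Str.len w = 0 then false           -- 'not language[0]'
    else isLongueurFixeLoop (PySem.Str.len w) language

-- ===== PORT B =====
def isLongueurFixe_alt (language : List String) : Bool :=
  match language with
  | [] => false
  | w :: _ =>
    if PySem.Str.len w = 0 then false
    else
      let lengths := language.map PySem.Str.len
      PySem.List.min? lengths (fun x => x) == PySem.List.max? lengths (fun x => x)

-- ===== PRECONDITION & SPEC =====
def Spec_isLongueurFixe (language : List String) (out : Bool) : Prop := out = isLongueurFixe_alt language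
instance (language : List String) (out : Bool) : Decidable (Spec_isLongueurFixe language out) := by unfold Spec_isLongueurFixe; infer_instance

-- ===== CLAIM (what is proved, stated in full; the proofs are below) =====
def Claim_equal_isLongueurFixe : Prop := ∀ (language : List String), Dom_isLongueurFixe language → Spec_isLongueurFixe language (isLongueurFixe language)

-- ===== LEMMAS AND PROOFS =====

theorem loop_eq_all (longueur : Int) (l : List String) :
    isLongueurFixeLoop longueur l = l.all (fun m => PySem.Str.len m == longueur) := by
  induction l with
  | nil => rfl
  | cons x xs ih =>
    simp only [isLongueurFixeLoop, List.all_cons]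
    by_cases h : PySem.Str.len x = longueur
    · simp only [h, ne_eq, not_true_eq_false, if_false, ih, beq_self_eq_true, Bool.true_and]
    · rw [if_pos h]
      simp only [Bool.false_eq]
      simp
      intro hx
      exact absurd (by simpa using hx) h

theorem foldl_min_le_init (t : List Int) (a : Int) : t.foldl min a ≤ a := by
  induction t generalizing a with
  | nil => simp
  | cons y ys ih => exact le_trans (ih (min a y)) (min_le_left a y)

theorem init_le_foldl_max (t : List Int) (a : Int) : a ≤ t.foldl max a := by
  induction t generalizing a with
  | nil => simp
  | cons y ys ih => exact le_trans (le_max_left a y) (ih (max a y))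

theorem foldl_min_le_mem (t : List Int) (a x : Int) (hx : x ∈ t) : t.foldl min a ≤ x := by
  induction t generalizing a with
  | nil => cases hx
  | cons y ys ih =>
    rcases List.mem_cons.mp hx with rfl | hx
    · exact le_trans (foldl_min_le_init ys (min a x)) (min_le_right a x)
    · exact ih (min a y) hx

theorem mem_le_foldl_max (t : List Int) (a x : Int) (hx : x ∈ t) : x ≤ t.foldl max a := by
  induction t generalizing a with
  | nil => cases hx
  | cons y ys ih =>
    rcases List.mem_cons.mp hx with rfl | hx
    · exact le_trans (le_max_right a x) (init_le_foldl_max ys (max a x))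
    · exact ih (max a y) hx

theorem foldl_eq_of_all_eq (t : List Int) (a : Int) (h : ∀ x ∈ t, x = a) :
    t.foldl min a = a ∧ t.foldl max a = a := by
  induction t with
  | nil => simp
  | cons y ys ih =>
    have hy : y = a := h y (by simp)
    subst hy
    simp only [List.foldl_cons, min_self, max_self]
    exact ih (fun x hx => h x (by simp [hx]))

theorem min_eq_max_iff (t : List Int) (a : Int) :
    (t.foldl min a = t.foldl max a) ↔ ∀ x ∈ t, x = a := by
  constructor
  · intro h
    have h1 := foldl_min_le_init t a
    have h2 := init_le_foldl_max t a
    have ha : t.foldl min a = a := le_antisymm h1 (h ▸ h2)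
    intro x hx
    have := foldl_min_le_mem t a x hx
    have := mem_le_foldl_max t a x hx
    omega
  · intro h
    obtain ⟨h1, h2⟩ := foldl_eq_of_all_eq t a h
    rw [h1, h2]

-- ===== VERDICT (by name: the statement is the Claim_ definition above) =====
theorem isLongueurFixe_spec : Claim_equal_isLongueurFixe := by
  intro language _
  unfold Spec_isLongueurFixe isLongueurFixe isLongueurFixe_alt
  match language with
  | [] => rfl
  | w :: rest =>
    by_cases h0 : PySem.Str.len w = 0
    · simp only [h0, if_true]
    · simp only [h0, if_false]
      rw [loop_eq_all]
      simp only [List.map_cons, PySem.List.min?_id_cons, PySem.List.max?_id_cons]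
      rw [Bool.eq_iff_iff]
      simp only [List.all_eq_true, beq_iff_eq, Option.some.injEq, List.mem_cons,
        min_eq_max_iff (rest.map PySem.Str.len) (PySem.Str.len w), List.forall_mem_map]
      constructor
      · intro hall x hx; exact hall x (Or.inr hx)
      · intro hall x hx
        rcases hx with rfl | hx
        · rfl
        · exact hall x hx
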